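-- pv_equiv track=rewrite | github.com/image-rs/image-tiff | tests/gen_seq_images.py | apply_horizontal_predictor_rgb
-- ===== SOURCE A (Python) =====
-- def apply_horizontal_predictor_rgb(values, bits, width, channels):
--     """Apply horizontal predictor for interleaved RGB data."""
--     height = len(values) // (width * channels)
--     mod = 1 << bits
--     result = list(values)
--     stride = width * channels
--     for y in range(height):
--         row_start = y * stride
--         # Work backwards to avoid overwriting values we still need
--         for x in range(width - 1, 0, -1):
--             for c in range(channels):
--                 idx = row_start + x * channels + c
--                 prev = row_start + (x - 1) * channels + c
--                 result[idx] = (result[idx] - result[prev]) % mod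
--     return result
-- ===== SOURCE B (Python) =====
-- def apply_horizontal_predictor_rgb(values, bits, width, channels):
--     """Horizontal differencing predictor: one flat forward pass over the original data."""
--     stride = width * channels
--     height = len(values) // stride
--     mod = 1 << bits
--     if stride <= 0 or channels <= 0:
--         # degenerate geometry: no full row / no channel, nothing to difference
--         return list(values)
--     limit = height * stride
--     return [(v - values[i - channels]) % mod if i < limit and i % stride >= channels else v
--             for i, v in enumerate(values)]
-- ===== Notes on version B (the rewrite author's own statement) =====
-- stated objective: simpler
-- what changed: Replaces the three nested backwards in-place loops with a single forward comprehension over the original list, using i % stride >= channels to detect non-first-column positions and reading the subtracted neighbour from the unmodified input (a degenerate non-positive stride/channels geometry returns an untouched copy, as A's empty loops do).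
import Mathlib
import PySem

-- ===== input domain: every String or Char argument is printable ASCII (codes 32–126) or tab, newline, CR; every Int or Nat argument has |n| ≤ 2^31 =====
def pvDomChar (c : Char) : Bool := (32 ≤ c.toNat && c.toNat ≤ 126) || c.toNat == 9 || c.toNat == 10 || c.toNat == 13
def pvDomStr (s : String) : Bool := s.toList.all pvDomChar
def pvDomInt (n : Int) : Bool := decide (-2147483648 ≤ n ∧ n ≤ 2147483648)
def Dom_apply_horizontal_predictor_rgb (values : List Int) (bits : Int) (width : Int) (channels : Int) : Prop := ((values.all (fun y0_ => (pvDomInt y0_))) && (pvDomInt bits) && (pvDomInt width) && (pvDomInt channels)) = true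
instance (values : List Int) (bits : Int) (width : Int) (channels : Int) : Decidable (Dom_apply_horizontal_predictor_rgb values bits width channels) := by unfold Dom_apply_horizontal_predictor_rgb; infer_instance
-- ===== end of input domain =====

-- B replaces A's three nested backwards in-place loops by one forward flat pass reading the
-- unmodified input (objective: simpler); equivalence is about the return value (A mutates only its local copy).


-- ===== PORT A =====
-- literal transliteration of A; '1 << bits' is ported as '1 <<< bits.toNat', exact for 0 ≤ bits (Pre_)
def apply_horizontal_predictor_rgb (values : List Int) (bits : Int) (width : Int) (channels : Int) : List Int :=
  let height := PySem.Int.floordiv (values.length : Int) (width * channels)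
  let mod := (1 : Int) <<< bits.toNat
  let result := values
  let stride := width * channels
  (PySem.List.pyRange 0 height 1).foldl (fun result y =>
    let row_start := y * stride
    (PySem.List.pyRange (width - 1) 0 (-1)).foldl (fun result x =>
      (PySem.List.pyRange 0 channels 1).foldl (fun result c =>
        let idx := row_start + x * channels + c
        let prev := row_start + (x - 1) * channels + c
        PySem.List.pySetD result idx
          (PySem.Int.mod (PySem.List.pyGetD result idx 0 - PySem.List.pyGetD result prev 0) mod))
        result) result) result

-- ===== PORT B =====
-- literal transliteration of Source B; '1 << bits' as above, exact for 0 ≤ bits (Pre_)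
def apply_horizontal_predictor_rgb_alt (values : List Int) (bits : Int) (width : Int) (channels : Int) : List Int :=
  let stride := width * channels
  let height := PySem.Int.floordiv (values.length : Int) stride
  let mod := (1 : Int) <<< bits.toNat
  if stride ≤ 0 ∨ channels ≤ 0 then values
  else
    let limit := height * stride
    (PySem.List.enumerate values).map (fun p =>
      if p.1 < limit ∧ channels ≤ PySem.Int.mod p.1 stride then
        PySem.Int.mod (p.2 - PySem.List.pyGetD values (p.1 - channels) 0) mod
      else p.2)

-- ===== PRECONDITION & SPEC =====
-- Pre_ excludes exactly the inputs where A raises: bits < 0 (ValueError from 1 << bits)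
-- and width*channels = 0 (ZeroDivisionError); B raises on exactly the same inputs.
def Pre_apply_horizontal_predictor_rgb (values : List Int) (bits : Int) (width : Int) (channels : Int) : Prop :=
  0 ≤ bits ∧ width * channels ≠ 0
instance (values : List Int) (bits : Int) (width : Int) (channels : Int) : Decidable (Pre_apply_horizontal_predictor_rgb values bits width channels) := by unfold Pre_apply_horizontal_predictor_rgb; infer_instance
def pvWitness_apply_horizontal_predictor_rgb : List Int × Int × Int × Int := ([1, 2, 3, 4, 5, 6], 8, 3, 1)

def Spec_apply_horizontal_predictor_rgb (values : List Int) (bits : Int) (width : Int) (channels : Int) (out : List Int) : Prop := out = apply_horizontal_predictor_rgb_alt values bits width channels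
instance (values : List Int) (bits : Int) (width : Int) (channels : Int) (out : List Int) : Decidable (Spec_apply_horizontal_predictor_rgb values bits width channels out) := by unfold Spec_apply_horizontal_predictor_rgb; infer_instance

-- ===== CLAIM (what is proved, stated in full; the proofs are below) =====
def Claim_equal_apply_horizontal_predictor_rgb : Prop := ∀ (values : List Int) (bits : Int) (width : Int) (channels : Int), Dom_apply_horizontal_predictor_rgb values bits width channels → Pre_apply_horizontal_predictor_rgb values bits width channels → Spec_apply_horizontal_predictor_rgb values bits width channels (apply_horizontal_predictor_rgb values bits width channels)

-- ===== LEMMAS AND PROOFS =====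

-- one in-place write of A's inner loop body, abstracted over the (idx, prev) pair
def wstep (m : Int) (st : List Int) (p : Int × Int) : List Int :=
  PySem.List.pySetD st p.1 (PySem.Int.mod (PySem.List.pyGetD st p.1 0 - PySem.List.pyGetD st p.2 0) m)

theorem pyGetD_set_int (st : List Int) (i k v : Int)
    (hi0 : 0 ≤ i) (hilen : i < (st.length : Int)) (hk0 : 0 ≤ k) :
    PySem.List.pyGetD (PySem.List.pySetD st i v) k 0 =
      if k = i then v else PySem.List.pyGetD st k 0 := by
  rw [PySem.List.pySetD_of_nonneg _ v hi0]
  rw [show k = ((k.toNat : Nat) : Int) from (Int.toNat_of_nonneg hk0).symm]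
  rw [PySem.List.pyGetD_natCast, PySem.List.pyGetD_natCast]
  rw [List.getD_eq_getElem?_getD, List.getD_eq_getElem?_getD, List.getElem?_set]
  by_cases h : i.toNat = k.toNat
  · have h1 : ((k.toNat : Nat) : Int) = i := by omega
    have h2 : i.toNat < st.length := by omega
    rw [if_pos h, if_pos h2, if_pos h1]
    rfl
  · have h1 : ¬(((k.toNat : Nat) : Int) = i) := by omega
    rw [if_neg h, if_neg h1]

theorem length_wstep (m : Int) (st : List Int) (p : Int × Int) :
    (wstep m st p).length = st.length := PySem.List.length_pySetD st p.1 _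

-- main invariant: folding independent writes, each reading a position not yet written,
-- computes each target from the ORIGINAL values and leaves other positions alone
theorem fold_writes (m : Int) (vals : List Int) :
    ∀ (L : List (Int × Int)) (st : List Int),
      st.length = vals.length →
      (∀ p ∈ L, 0 ≤ p.2 ∧ p.2 < p.1 ∧ p.1 < (vals.length : Int)) →
      L.Pairwise (fun a b => a.1 ≠ b.1) →
      L.Pairwise (fun a b => a.1 ≠ b.2) →
      (∀ p ∈ L, PySem.List.pyGetD st p.1 0 = PySem.List.pyGetD vals p.1 0 ∧
                PySem.List.pyGetD st p.2 0 = PySem.List.pyGetD vals p.2 0) →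
      (L.foldl (wstep m) st).length = vals.length ∧
      (∀ p ∈ L, PySem.List.pyGetD (L.foldl (wstep m) st) p.1 0 =
          PySem.Int.mod (PySem.List.pyGetD vals p.1 0 - PySem.List.pyGetD vals p.2 0) m) ∧
      (∀ i : Int, 0 ≤ i → (∀ p ∈ L, p.1 ≠ i) →
          PySem.List.pyGetD (L.foldl (wstep m) st) i 0 = PySem.List.pyGetD st i 0) := by
  intro L
  induction L with
  | nil => intro st hlen _ _ _ _; exact ⟨hlen, by simp, by simp⟩
  | cons p L ih =>
    intro st hlen hbnd hP1 hP2 hagree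
    obtain ⟨hp2, hp21, hp1⟩ := hbnd p (List.mem_cons_self)
    have hp10 : 0 ≤ p.1 := by omega
    have hstlen : p.1 < (st.length : Int) := by omega
    have hget : ∀ k : Int, 0 ≤ k →
        PySem.List.pyGetD (wstep m st p) k 0 =
          if k = p.1 then PySem.Int.mod (PySem.List.pyGetD vals p.1 0 - PySem.List.pyGetD vals p.2 0) m
          else PySem.List.pyGetD st k 0 := by
      intro k hk
      unfold wstep
      rw [pyGetD_set_int st p.1 k _ hp10 hstlen hk]
      obtain ⟨e1, e2⟩ := hagree p (List.mem_cons_self)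
      rw [e1, e2]
    have hlen' : (wstep m st p).length = vals.length := by rw [length_wstep]; exact hlen
    have hP1' := (List.pairwise_cons.mp hP1)
    have hP2' := (List.pairwise_cons.mp hP2)
    have hagree' : ∀ q ∈ L, PySem.List.pyGetD (wstep m st p) q.1 0 = PySem.List.pyGetD vals q.1 0 ∧
        PySem.List.pyGetD (wstep m st p) q.2 0 = PySem.List.pyGetD vals q.2 0 := by
      intro q hq
      obtain ⟨hq2, hq21, hq1⟩ := hbnd q (List.mem_cons_of_mem _ hq)
      constructor
      · rw [hget q.1 (by omega), if_neg (Ne.symm (hP1'.1 q hq)), (hagree q (List.mem_cons_of_mem _ hq)).1]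
      · rw [hget q.2 (by omega), if_neg (Ne.symm (hP2'.1 q hq)), (hagree q (List.mem_cons_of_mem _ hq)).2]
    obtain ⟨c1, c2, c3⟩ := ih (wstep m st p) hlen'
      (fun q hq => hbnd q (List.mem_cons_of_mem _ hq)) hP1'.2 hP2'.2 hagree'
    refine ⟨by simpa using c1, ?_, ?_⟩
    · intro q hq
      rcases List.mem_cons.mp hq with h | h
      · subst h
        rw [List.foldl_cons, c3 q.1 (by omega) (fun r hr => (hP1'.1 r hr).symm), hget q.1 (by omega), if_pos rfl]
      · rw [List.foldl_cons]; exact c2 q h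
    · intro i hi hni
      rw [List.foldl_cons, c3 i hi (fun r hr => hni r (List.mem_cons_of_mem _ hr)),
        hget i hi, if_neg (fun he => hni p List.mem_cons_self he.symm)]

-- uniqueness of euclidean decomposition over an arbitrary positive block size
theorem euclid_unique (S y a y' a' : Int) (hS : 0 < S)
    (ha : 0 ≤ a) (haS : a < S) (ha' : 0 ≤ a') (haS' : a' < S)
    (h : y * S + a = y' * S + a') : y = y' ∧ a = a' := by
  have key : ∀ (z b : Int), 0 ≤ b → b < S → (z * S + b) % S = b := by
    intro z b h1 h2
    have : z * S + b = b + S * z := by ring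
    rw [this, Int.add_mul_emod_self_left]
    exact Int.emod_eq_of_lt h1 h2
  have haa : a = a' := by
    have := key y a ha haS
    rw [h, key y' a' ha' haS'] at this
    omega
  subst haa
  have : y * S = y' * S := by omega
  exact ⟨mul_right_cancel₀ (ne_of_gt hS) this, rfl⟩

theorem split_unique (w chan y x c y' x' c' : Int) (hch : 0 < chan)
    (hx : 0 ≤ x) (hxw : x < w) (hc : 0 ≤ c) (hcc : c < chan)
    (hx' : 0 ≤ x') (hxw' : x' < w) (hc' : 0 ≤ c') (hcc' : c' < chan)
    (heq : y * (w * chan) + (x * chan + c) = y' * (w * chan) + (x' * chan + c')) :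
    y = y' ∧ x = x' ∧ c = c' := by
  have hw : 0 < w := by omega
  have hb : ∀ (u v : Int), 0 ≤ u → u < w → 0 ≤ v → v < chan → 0 ≤ u * chan + v ∧ u * chan + v < w * chan := by
    intro u v h1 h2 h3 h4
    refine ⟨add_nonneg (mul_nonneg h1 hch.le) h3, ?_⟩
    have e1 : u * chan + v < (u + 1) * chan := by nlinarith
    have e2 : (u + 1) * chan ≤ w * chan := mul_le_mul_of_nonneg_right (by omega) hch.le
    linarith
  obtain ⟨hb1, hb2⟩ := hb x c hx hxw hc hcc
  obtain ⟨hb1', hb2'⟩ := hb x' c' hx' hxw' hc' hcc'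
  obtain ⟨hy, hxc⟩ := euclid_unique (w * chan) y _ y' _ (mul_pos hw hch) hb1 hb2 hb1' hb2' heq
  obtain ⟨hxx, hcc2⟩ := euclid_unique chan x c x' c' hch hc hcc hc' hcc' hxc
  exact ⟨hy, hxx, hcc2⟩

theorem idx_ne (w chan y x c y' x' c' : Int) (hch : 0 < chan)
    (hx : 0 ≤ x) (hxw : x < w) (hc : 0 ≤ c) (hcc : c < chan)
    (hx' : 0 ≤ x') (hxw' : x' < w) (hc' : 0 ≤ c') (hcc' : c' < chan)
    (hne : ¬(y = y' ∧ x = x' ∧ c = c')) :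
    y * (w * chan) + x * chan + c ≠ y' * (w * chan) + x' * chan + c' := by
  intro h
  exact hne (split_unique w chan y x c y' x' c' hch hx hxw hc hcc hx' hxw' hc' hcc'
    (by linarith [h] <;> ring_nf))

-- the (idx, prev) pairs of A's triple loop, in A's iteration order
def LA (h s w chan : Int) : List (Int × Int) :=
  (PySem.List.pyRange 0 h 1).flatMap (fun y =>
    (PySem.List.pyRange (w - 1) 0 (-1)).flatMap (fun x =>
      (PySem.List.pyRange 0 chan 1).map (fun c =>
        (y * s + x * chan + c, y * s + (x - 1) * chan + c))))

theorem block_mod (S z b : Int) (hS : 0 < S) (h1 : 0 ≤ b) (h2 : b < S) :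
    PySem.Int.mod (z * S + b) S = b := by
  rw [PySem.Int.mod_eq_emod_of_pos hS]
  have e : z * S + b = b + S * z := by ring
  rw [e, Int.add_mul_emod_self_left]
  exact Int.emod_eq_of_lt h1 h2

theorem A_eq_fold (values : List Int) (bits width channels : Int) :
    apply_horizontal_predictor_rgb values bits width channels =
      (LA (PySem.Int.floordiv (values.length : Int) (width * channels)) (width * channels) width channels).foldl
        (wstep ((1 : Int) <<< bits.toNat)) values := by
  unfold apply_horizontal_predictor_rgb LA wstep
  simp only [List.foldl_flatMap, List.foldl_map]

theorem mem_LA (h s w chan : Int) (p : Int × Int) :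
    p ∈ LA h s w chan ↔ ∃ y x c : Int, (0 ≤ y ∧ y < h) ∧ (0 < x ∧ x ≤ w - 1) ∧ (0 ≤ c ∧ c < chan) ∧
      p = (y * s + x * chan + c, y * s + (x - 1) * chan + c) := by
  unfold LA
  simp only [List.mem_flatMap, List.mem_map, PySem.List.mem_pyRange_one, PySem.List.mem_pyRange_neg_one]
  constructor
  · rintro ⟨y, hy, x, hx, c, hc, rfl⟩
    exact ⟨y, x, c, hy, hx, hc, rfl⟩
  · rintro ⟨y, x, c, hy, hx, hc, rfl⟩
    exact ⟨y, hy, x, hx, c, hc, rfl⟩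

theorem pair_ne (w chan y x c y' x' c' : Int) (hch : 0 < chan)
    (hx : 0 < x) (hxw : x ≤ w - 1) (hc : 0 ≤ c) (hcc : c < chan)
    (hx' : 0 < x') (hxw' : x' ≤ w - 1) (hc' : 0 ≤ c') (hcc' : c' < chan)
    (hord : y < y' ∨ (y = y' ∧ x' < x) ∨ (y = y' ∧ x = x' ∧ c < c')) :
    (y * (w * chan) + x * chan + c ≠ y' * (w * chan) + x' * chan + c') ∧
    (y * (w * chan) + x * chan + c ≠ y' * (w * chan) + (x' - 1) * chan + c') := by
  constructor
  · exact idx_ne w chan y x c y' x' c' hch (by omega) (by omega) hc hcc (by omega) (by omega) hc' hcc'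
      (by rintro ⟨rfl, rfl, rfl⟩; omega)
  · exact idx_ne w chan y x c y' (x' - 1) c' hch (by omega) (by omega) hc hcc (by omega) (by omega) hc' hcc'
      (by rintro ⟨rfl, h2, rfl⟩; omega)

theorem mem_inner (s w chan y : Int) (p : Int × Int) :
    p ∈ (PySem.List.pyRange (w - 1) 0 (-1)).flatMap (fun x =>
        (PySem.List.pyRange 0 chan 1).map (fun c =>
          (y * s + x * chan + c, y * s + (x - 1) * chan + c))) ↔
      ∃ x c : Int, (0 < x ∧ x ≤ w - 1) ∧ (0 ≤ c ∧ c < chan) ∧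
        p = (y * s + x * chan + c, y * s + (x - 1) * chan + c) := by
  simp only [List.mem_flatMap, List.mem_map, PySem.List.mem_pyRange_one, PySem.List.mem_pyRange_neg_one]
  constructor
  · rintro ⟨x, hx, c, hc, rfl⟩
    exact ⟨x, c, hx, hc, rfl⟩
  · rintro ⟨x, c, hx, hc, rfl⟩
    exact ⟨x, hx, c, hc, rfl⟩

theorem LA_pairwise (h w chan : Int) (hch : 0 < chan) :
    (LA h (w * chan) w chan).Pairwise (fun a b => a.1 ≠ b.1 ∧ a.1 ≠ b.2) := by
  have hgt : (PySem.List.pyRange (w - 1) 0 (-1)).Pairwise (fun a b => b < a) := by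
    rw [PySem.List.pyRange_neg_one_eq_reverse, List.pairwise_reverse]
    exact PySem.List.pairwise_lt_pyRange_one _ _
  unfold LA
  rw [List.pairwise_flatMap]
  constructor
  · intro y hy
    rw [List.pairwise_flatMap]
    constructor
    · intro x hx
      rw [PySem.List.mem_pyRange_neg_one] at hx
      rw [List.pairwise_map]
      refine (PySem.List.pairwise_lt_pyRange_one 0 chan).imp_of_mem ?_
      intro c c' hc hc' hcc'
      rw [PySem.List.mem_pyRange_one] at hc hc'
      exact pair_ne w chan y x c y x c' hch hx.1 hx.2 hc.1 hc.2 hx.1 hx.2 hc'.1 hc'.2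
        (Or.inr (Or.inr ⟨rfl, rfl, hcc'⟩))
    · refine hgt.imp_of_mem ?_
      intro x x' hx hx' hord p hp q hq
      rw [PySem.List.mem_pyRange_neg_one] at hx hx'
      rw [List.mem_map] at hp hq
      obtain ⟨c, hc, rfl⟩ := hp
      obtain ⟨c', hc', rfl⟩ := hq
      rw [PySem.List.mem_pyRange_one] at hc hc'
      exact pair_ne w chan y x c y x' c' hch hx.1 hx.2 hc.1 hc.2 hx'.1 hx'.2 hc'.1 hc'.2
        (Or.inr (Or.inl ⟨rfl, hord⟩))
  · refine (PySem.List.pairwise_lt_pyRange_one 0 h).imp_of_mem ?_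
    intro y y' hy hy' hord p hp q hq
    rw [mem_inner] at hp hq
    obtain ⟨x, c, hx, hc, rfl⟩ := hp
    obtain ⟨x', c', hx', hc', rfl⟩ := hq
    exact pair_ne w chan y x c y' x' c' hch hx.1 hx.2 hc.1 hc.2 hx'.1 hx'.2 hc'.1 hc'.2
      (Or.inl hord)

theorem LA_bounds (n h w chan : Int) (hch : 0 < chan) (hw : 0 < w) (hh : h * (w * chan) ≤ n) :
    ∀ p ∈ LA h (w * chan) w chan, 0 ≤ p.2 ∧ p.2 < p.1 ∧ p.1 < n := by
  intro p hp
  rw [mem_LA] at hp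
  obtain ⟨y, x, c, hy, hx, hc, rfl⟩ := hp
  have e0 : 0 ≤ y * (w * chan) := mul_nonneg hy.1 (by positivity)
  have e1 : 0 ≤ (x - 1) * chan := mul_nonneg (by omega) hch.le
  have e2 : x * chan - (x - 1) * chan = chan := by ring
  have e3 : x * chan + c < w * chan := by nlinarith
  have e4 : (y + 1) * (w * chan) ≤ h * (w * chan) := mul_le_mul_of_nonneg_right (by omega) (by positivity)
  refine ⟨by simp only; omega, by simp only; omega, by simp only; nlinarith⟩

theorem LA_complete (n h w chan j : Int) (hch : 0 < chan) (hw : 0 < w) (hj : 0 ≤ j)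
    (h1 : j < h * (w * chan)) (h2 : chan ≤ PySem.Int.mod j (w * chan)) :
    (j, j - chan) ∈ LA h (w * chan) w chan := by
  have hs : 0 < w * chan := mul_pos hw hch
  have ed := PySem.Int.floordiv_mul_add_mod j (w * chan)
  have ec := PySem.Int.floordiv_mul_add_mod (PySem.Int.mod j (w * chan)) chan
  have hm0 : 0 ≤ PySem.Int.mod j (w * chan) := PySem.Int.mod_nonneg _ hs
  have hm1 : PySem.Int.mod j (w * chan) < w * chan := PySem.Int.mod_lt _ hs
  have hc0 : 0 ≤ PySem.Int.mod (PySem.Int.mod j (w * chan)) chan := PySem.Int.mod_nonneg _ hch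
  have hc1 : PySem.Int.mod (PySem.Int.mod j (w * chan)) chan < chan := PySem.Int.mod_lt _ hch
  rw [mem_LA]
  refine ⟨PySem.Int.floordiv j (w * chan), PySem.Int.floordiv (PySem.Int.mod j (w * chan)) chan,
    PySem.Int.mod (PySem.Int.mod j (w * chan)) chan, ⟨?_, ?_⟩, ⟨?_, ?_⟩, ⟨hc0, hc1⟩, ?_⟩
  · exact (PySem.Int.le_floordiv_iff_mul_le hs).mpr (by omega)
  · exact (PySem.Int.floordiv_lt_iff_lt_mul hs).mpr (by omega)
  · exact (PySem.Int.le_floordiv_iff_mul_le hch).mpr (by omega)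
  · have := (PySem.Int.floordiv_lt_iff_lt_mul hch).mpr (show PySem.Int.mod j (w * chan) < w * chan by omega)
    omega
  · have : j - chan = PySem.Int.floordiv j (w * chan) * (w * chan) +
        (PySem.Int.floordiv (PySem.Int.mod j (w * chan)) chan - 1) * chan +
        PySem.Int.mod (PySem.Int.mod j (w * chan)) chan := by
      have e : (PySem.Int.floordiv (PySem.Int.mod j (w * chan)) chan - 1) * chan =
          PySem.Int.floordiv (PySem.Int.mod j (w * chan)) chan * chan - chan := by ring
      omega
    have this2 : j = PySem.Int.floordiv j (w * chan) * (w * chan) +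
        PySem.Int.floordiv (PySem.Int.mod j (w * chan)) chan * chan +
        PySem.Int.mod (PySem.Int.mod j (w * chan)) chan := by omega
    rw [Prod.ext_iff]
    exact ⟨by omega, by omega⟩

theorem LA_sound (h w chan : Int) (hch : 0 < chan) :
    ∀ p ∈ LA h (w * chan) w chan,
      chan ≤ PySem.Int.mod p.1 (w * chan) ∧ p.1 < h * (w * chan) := by
  intro p hp
  rw [mem_LA] at hp
  obtain ⟨y, x, c, hy, hx, hc, rfl⟩ := hp
  have hw : 0 < w := by omega
  have e3 : 0 ≤ x * chan + c ∧ x * chan + c < w * chan := by constructor <;> nlinarith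
  have e5 : chan ≤ x * chan := by nlinarith
  constructor
  · have : y * (w * chan) + x * chan + c = y * (w * chan) + (x * chan + c) := by ring
    simp only [this, block_mod _ _ _ (mul_pos hw hch) e3.1 e3.2]
    omega
  · have e4 : (y + 1) * (w * chan) ≤ h * (w * chan) := mul_le_mul_of_nonneg_right (by omega) (by positivity)
    simp only
    nlinarith

theorem length_enumerate {A : Type} (xs : List A) : ∀ (s : Int),
    (PySem.List.enumerate xs s).length = xs.length := by
  induction xs with
  | nil => intro s; rfl
  | cons x xs ih => intro s; rw [PySem.List.enumerate_cons]; simp [ih]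

theorem enumerate_getElem? {A : Type} (xs : List A) : ∀ (s : Int) (j : Nat),
    (PySem.List.enumerate xs s)[j]? = xs[j]?.map (fun v => (s + (j : Int), v)) := by
  induction xs with
  | nil => intro s j; rw [PySem.List.enumerate_nil]; simp
  | cons x xs ih =>
    intro s j
    rw [PySem.List.enumerate_cons]
    cases j with
    | zero => simp
    | succ j =>
      simp only [List.getElem?_cons_succ, ih (s + 1) j]
      have e : s + 1 + (j : Int) = s + ((j + 1 : Nat) : Int) := by push_cast; ring
      rw [e]

-- ===== VERDICT (by name: the statement is the Claim_ definition above) =====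
theorem B_degenerate (values : List Int) (bits width channels : Int)
    (h : width * channels ≤ 0 ∨ channels ≤ 0) :
    apply_horizontal_predictor_rgb_alt values bits width channels = values := by
  unfold apply_horizontal_predictor_rgb_alt
  rw [if_pos h]

theorem getD_nat (xs : List Int) (k : Nat) (hk : k < xs.length) :
    PySem.List.pyGetD xs (k : Int) 0 = xs[k] := by
  rw [PySem.List.pyGetD_eq_getElem xs 0 (by positivity) (by exact_mod_cast hk)]
  simp

theorem apply_horizontal_predictor_rgb_spec : Claim_equal_apply_horizontal_predictor_rgb := by
  intro values bits width channels _ hpre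
  obtain ⟨hbits, hsz⟩ := hpre
  unfold Spec_apply_horizontal_predictor_rgb
  by_cases hstr : width * channels ≤ 0
  · -- stride < 0: both return the untouched input
    rw [B_degenerate values bits width channels (Or.inl hstr)]
    have hlt : width * channels < 0 := lt_of_le_of_ne hstr hsz
    have hfd : PySem.Int.floordiv (values.length : Int) (width * channels) ≤ 0 := by
      have e := PySem.Int.floordiv_mul_add_mod (values.length : Int) (width * channels)
      have mb := PySem.Int.mod_neg_bounds (a := (values.length : Int)) hlt
      by_contra hpos
      push_neg at hpos
      have h1 : PySem.Int.floordiv (values.length : Int) (width * channels) * (width * channels) ≤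
          1 * (width * channels) := mul_le_mul_of_nonpos_right (by omega) hlt.le
      have hn : (0 : Int) ≤ (values.length : Int) := by positivity
      linarith
    rw [A_eq_fold]
    unfold LA
    rw [PySem.List.pyRange_one_eq_nil hfd]
    rfl
  · push_neg at hstr
    by_cases hchan : channels ≤ 0
    · -- channels < 0 (and hence width < 0): both return the untouched input
      rw [B_degenerate values bits width channels (Or.inr hchan)]
      have hwneg : width - 1 ≤ 0 := by
        by_contra hw
        push_neg at hw
        have : width * channels ≤ 0 := mul_nonpos_of_nonneg_of_nonpos (by omega) hchan
        linarith
      rw [A_eq_fold]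
      unfold LA
      simp only [PySem.List.pyRange_neg_one_eq_nil hwneg, List.flatMap_nil]
      have e : List.flatMap (fun y : Int => ([] : List (Int × Int)))
          (PySem.List.pyRange 0 (PySem.Int.floordiv (values.length : Int) (width * channels)) 1) = [] :=
        List.flatMap_eq_nil_iff.mpr (fun _ _ => rfl)
      rw [e]
      rfl
    · -- main case: 0 < channels, 0 < width
      push_neg at hchan
      have hwpos : 0 < width := by
        by_contra hw
        push_neg at hw
        have : width * channels ≤ 0 := mul_nonpos_of_nonpos_of_nonneg hw hchan.le
        linarith
      have hspos : 0 < width * channels := hstr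
      have hHs : PySem.Int.floordiv (values.length : Int) (width * channels) * (width * channels) ≤
          (values.length : Int) := by
        have e := PySem.Int.floordiv_mul_add_mod (values.length : Int) (width * channels)
        have e2 := PySem.Int.mod_nonneg (values.length : Int) hspos
        linarith
      have hpair := LA_pairwise (PySem.Int.floordiv (values.length : Int) (width * channels))
        width channels hchan
      obtain ⟨c1, c2, c3⟩ := fold_writes ((1 : Int) <<< bits.toNat) values
        (LA (PySem.Int.floordiv (values.length : Int) (width * channels)) (width * channels) width channels)
        values rfl
        (LA_bounds (values.length : Int) _ width channels hchan hwpos hHs)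
        (hpair.imp (fun h => h.1)) (hpair.imp (fun h => h.2))
        (fun p _ => ⟨rfl, rfl⟩)
      rw [A_eq_fold]
      unfold apply_horizontal_predictor_rgb_alt
      rw [if_neg (not_or.mpr ⟨by omega, by omega⟩)]
      apply List.ext_getElem
      · rw [c1]
        simp
      · intro j hj1 hj2
        have hjn : j < values.length := by
          simpa [length_enumerate] using hj2
        -- right-hand side: entry j of the mapped enumeration
        have eRHS : ((PySem.List.enumerate values).map (fun p =>
            if p.1 < PySem.Int.floordiv (values.length : Int) (width * channels) * (width * channels) ∧
                channels ≤ PySem.Int.mod p.1 (width * channels) then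
              PySem.Int.mod (p.2 - PySem.List.pyGetD values (p.1 - channels) 0) ((1 : Int) <<< bits.toNat)
            else p.2))[j]'hj2 =
            (if ((j : Int)) < PySem.Int.floordiv (values.length : Int) (width * channels) * (width * channels) ∧
                channels ≤ PySem.Int.mod ((j : Int)) (width * channels) then
              PySem.Int.mod (values[j] - PySem.List.pyGetD values (((j : Int)) - channels) 0) ((1 : Int) <<< bits.toNat)
            else values[j]) := by
          have h1 : (PySem.List.enumerate values)[j]? = some ((0 : Int) + (j : Int), values[j]) := by
            rw [enumerate_getElem? values 0 j]
            simp [hjn]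
          have h2 : j < (PySem.List.enumerate values).length := by
            rw [length_enumerate]; exact hjn
          have h3 : (PySem.List.enumerate values)[j]'h2 = ((0 : Int) + (j : Int), values[j]) := by
            have := List.getElem?_eq_getElem h2
            rw [h1] at this
            exact (Option.some.injEq _ _).mp this.symm
          rw [List.getElem_map]
          rw [h3]
          simp only [zero_add]
        rw [eRHS]
        -- left-hand side through pyGetD
        have hjf : j < (List.foldl (wstep ((1 : Int) <<< bits.toNat)) values
            (LA (PySem.Int.floordiv (values.length : Int) (width * channels)) (width * channels) width channels)).length := hj1
        have eLHS : (List.foldl (wstep ((1 : Int) <<< bits.toNat)) values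
            (LA (PySem.Int.floordiv (values.length : Int) (width * channels)) (width * channels) width channels))[j]'hj1 =
            PySem.List.pyGetD (List.foldl (wstep ((1 : Int) <<< bits.toNat)) values
              (LA (PySem.Int.floordiv (values.length : Int) (width * channels)) (width * channels) width channels)) ((j : Int)) 0 := by
          rw [getD_nat _ j hjf]
        rw [eLHS]
        by_cases hcond : ((j : Int)) < PySem.Int.floordiv (values.length : Int) (width * channels) * (width * channels) ∧
            channels ≤ PySem.Int.mod ((j : Int)) (width * channels)
        · have hmem := LA_complete (values.length : Int) _ width channels (j : Int) hchan hwpos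
            (by positivity) hcond.1 hcond.2
          have e2 := c2 ((j : Int), (j : Int) - channels) hmem
          rw [if_pos hcond]
          rw [e2]
          rw [getD_nat values j hjn]
        · have hnot : ∀ p ∈ LA (PySem.Int.floordiv (values.length : Int) (width * channels))
              (width * channels) width channels, p.1 ≠ ((j : Int)) := by
            intro p hp hpj
            have hs := LA_sound (PySem.Int.floordiv (values.length : Int) (width * channels))
              width channels hchan p hp
            exact hcond ⟨hpj ▸ hs.2, hpj ▸ hs.1⟩
          have e3 := c3 ((j : Int)) (by positivity) hnot
          rw [if_neg hcond, e3, getD_nat values j hjn]
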